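-- pv_equiv track=rewrite | github.com/scylladb/scylladb | test/nodetool/test_gossipinfo.py | normalize_endpoints
-- ===== SOURCE A (Python) =====
-- def normalize_endpoints(endpoints):
--     # Cassandra's nodetool uses HashMap under the hood for collecting the map
--     # from state to the value of that state, and print out them by iterating
--     # the keys, but the order is not guaranteed to be ordered or consistent, so
--     # let's extract the state values out and sort them before comparing.
--     normalized = {}
--     addrs = None
--     state = []
--
--     def maybe_add_endpoint():
--         if addrs is not None:
--             normalized[addrs] = sorted(state)
--
--     for line in endpoints.split('\n'):
--         if line.startswith('/'):
--             maybe_add_endpoint()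
--             addrs = line
--             state = []
--         else:
--             state.append(line)
--     maybe_add_endpoint()
--
--     return sorted(normalized)
-- ===== SOURCE B (Python) =====
-- def normalize_endpoints(endpoints):
--     # The dict values (sorted state lines) built by A are never used: only the
--     # sorted keys are returned, and the keys are exactly the lines starting with '/'.
--     return sorted({line for line in endpoints.split('\n') if line.startswith('/')})
-- ===== Notes on version B (the rewrite author's own statement) =====
-- stated objective: simpler
-- what changed: Dropped the state-machine (dict accumulator, pending-address variable, per-endpoint state list with the maybe_add_endpoint closure) entirely: since only the sorted dict keys are returned, B collects the lines starting with '/' into a set in one pass and returns them sorted.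
import Mathlib
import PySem

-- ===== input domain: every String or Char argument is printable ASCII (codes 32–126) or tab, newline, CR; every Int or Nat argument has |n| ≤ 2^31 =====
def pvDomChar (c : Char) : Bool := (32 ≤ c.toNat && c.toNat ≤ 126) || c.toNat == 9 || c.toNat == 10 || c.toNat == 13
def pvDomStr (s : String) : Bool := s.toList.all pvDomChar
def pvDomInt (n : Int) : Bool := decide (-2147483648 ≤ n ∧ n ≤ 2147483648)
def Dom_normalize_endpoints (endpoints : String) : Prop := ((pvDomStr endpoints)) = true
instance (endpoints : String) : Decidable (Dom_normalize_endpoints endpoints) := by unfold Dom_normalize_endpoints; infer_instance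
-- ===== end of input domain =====

-- B drops A's dict/state accumulator: only the sorted dict keys (the lines starting with '/') are returned. Objective: simpler.


-- ===== PORT A =====
-- maybe_add_endpoint: if addrs is not None, normalized[addrs] = sorted(state)
def pvMaybeAdd (normalized : PySem.Dict String (List String)) (addrs : Option String)
    (state : List String) : PySem.Dict String (List String) :=
  match addrs with
  | none => normalized
  | some a => normalized.insert a (PySem.List.sorted state (fun x => x) false)

-- the body of A's 'for line in endpoints.split('\n')' loop
def pvStepA (acc : PySem.Dict String (List String) × Option String × List String)
    (line : String) : PySem.Dict String (List String) × Option String × List String :=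
  if PySem.Str.startswith line "/" then
    (pvMaybeAdd acc.1 acc.2.1 acc.2.2, some line, [])
  else
    (acc.1, acc.2.1, acc.2.2 ++ [line])

-- the trailing maybe_add_endpoint() and 'return sorted(normalized)'
def pvReturnA (acc : PySem.Dict String (List String) × Option String × List String) :
    List String :=
  PySem.List.sorted (pvMaybeAdd acc.1 acc.2.1 acc.2.2).keys (fun x => x) false

-- endpoints.split('\n'): the separator is the non-empty literal '\n', so split? is always some
def normalize_endpoints (endpoints : String) : List String :=
  pvReturnA (((PySem.Str.split? endpoints "\n").getD []).foldl pvStepA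
    (PySem.Dict.empty, none, []))

-- ===== PORT B =====
def normalize_endpoints_alt (endpoints : String) : List String :=
  PySem.List.sorted
    (PySem.Set.ofList (((PySem.Str.split? endpoints "\n").getD []).filter
      (fun line => PySem.Str.startswith line "/")))
    (fun x => x) false

-- ===== PRECONDITION & SPEC =====
def Spec_normalize_endpoints (endpoints : String) (out : List String) : Prop := out = normalize_endpoints_alt endpoints
instance (endpoints : String) (out : List String) : Decidable (Spec_normalize_endpoints endpoints out) := by unfold Spec_normalize_endpoints; infer_instance

-- ===== CLAIM (what is proved, stated in full; the proofs are below) =====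
def Claim_equal_normalize_endpoints : Prop := ∀ (endpoints : String), Dom_normalize_endpoints endpoints → Spec_normalize_endpoints endpoints (normalize_endpoints endpoints)

-- ===== LEMMAS AND PROOFS =====

-- the keys of the dict after maybe_add_endpoint, as a set-add on the key list
theorem pvKeys_maybeAdd (d : PySem.Dict String (List String)) (a : Option String)
    (st : List String) :
    (pvMaybeAdd d a st).keys = (match a with
      | none => d.keys
      | some x => PySem.Set.add d.keys x) := by
  cases a with
  | none => rfl
  | some x =>
    simp only [pvMaybeAdd, PySem.Set.add]
    by_cases h : x ∈ d.keys
    · rw [PySem.Dict.keys_insert_of_contains _ _ ((PySem.Dict.contains_iff_mem_keys d x).mpr h)]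
      simp [PySem.Set.contains, h]
    · rw [PySem.Dict.keys_insert_of_not_contains _ _
        (by rw [Bool.eq_false_iff]; intro hc; exact h ((PySem.Dict.contains_iff_mem_keys d x).mp hc))]
      simp [PySem.Set.contains, h]

-- loop invariant: after folding the remaining lines, the key list of the final dict
-- (pending addrs included) is the current one updated with the '/'-lines of the rest
theorem pvLoopKeys (L : List String) (d : PySem.Dict String (List String))
    (a : Option String) (st : List String) :
    (pvMaybeAdd (L.foldl pvStepA (d, a, st)).1 (L.foldl pvStepA (d, a, st)).2.1
        (L.foldl pvStepA (d, a, st)).2.2).keys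
      = PySem.Set.update (pvMaybeAdd d a st).keys
          (L.filter (fun line => PySem.Str.startswith line "/")) := by
  induction L generalizing d a st with
  | nil => simp [PySem.Set.update]
  | cons l L ih =>
    by_cases h : PySem.Str.startswith l "/" = true
    · simp only [List.foldl_cons, pvStepA, h, if_pos, List.filter_cons]
      rw [ih]
      simp only [pvKeys_maybeAdd, PySem.Set.update, List.foldl_cons]
    · simp only [List.foldl_cons, pvStepA, h, if_neg, Bool.false_eq_true, not_false_iff,
        List.filter_cons]
      rw [ih]
      simp [pvKeys_maybeAdd]

-- ===== VERDICT (by name: the statement is the Claim_ definition above) =====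
theorem normalize_endpoints_spec : Claim_equal_normalize_endpoints := by
  intro endpoints _
  show _ = _
  unfold normalize_endpoints normalize_endpoints_alt pvReturnA
  rw [pvLoopKeys]
  rfl
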